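-- pv_equiv track=rewrite | github.com/DebojyotiMishra/EPITA-International-Bachelors-S2-Resources | Linear Algebra/algebra/relation.py | is_connected_relation
-- ===== SOURCE A (Python) =====
-- from typing import Set, Tuple
--
-- def is_relation(a: Set, b: Set, r: Set[Tuple]) -> bool:
--     """a and b are given sets (Python set, not lset),
--     r is a set of tuples (x,y).
--     Determine whether r is a relation"""
--     assert isinstance(a, set)
--     assert isinstance(b, set)
--     assert isinstance(r, set)
--     # CHALLENGE: student must complete the implementation.
--
--     return all(x in a and y in b
--                for (x, y) in r)
--
-- def is_connected_relation(a: Set, r: Set[Tuple]) -> bool: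
--     """a is a given set (Python set, not lset),
--     r is a set of tuples (x,y) for which x is in a and y is in a.
--     Determine whether the relation is a connected relation."""
--     assert isinstance(a, set)
--     assert isinstance(r, set)
--     # CHALLENGE: student must complete the implementation.
--
--     return is_relation(a, a, r) \
--         and all((x, y) in r or (y, x) in r
--                 for x in a
--                 for y in a
--                 if x != y
--                 )
-- ===== SOURCE B (Python) =====
-- from typing import Set, Tuple
--
--
-- def is_relation(a: Set, b: Set, r: Set[Tuple]) -> bool:
--     assert isinstance(a, set)
--     assert isinstance(b, set)
--     assert isinstance(r, set)
--     return all(x in a and y in b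
--                for (x, y) in r)
--
--
-- def is_connected_relation(a: Set, r: Set[Tuple]) -> bool:
--     assert isinstance(a, set)
--     assert isinstance(r, set)
--     if not is_relation(a, a, r):
--         return False
--     # count the distinct unordered pairs actually present in r (one pass over r)
--     covered = {(x, y) if x <= y else (y, x) for (x, y) in r if x != y}
--     n = len(a)
--     return len(covered) == n * (n - 1) // 2
-- ===== Notes on version B (the rewrite author's own statement) =====
-- stated objective: alternative
-- what changed: B keeps the is_relation guard but replaces A's membership test of every ordered pair of a by one pass over r that collects the distinct unordered pairs present and compares their count with n*(n-1)//2.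
import Mathlib
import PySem

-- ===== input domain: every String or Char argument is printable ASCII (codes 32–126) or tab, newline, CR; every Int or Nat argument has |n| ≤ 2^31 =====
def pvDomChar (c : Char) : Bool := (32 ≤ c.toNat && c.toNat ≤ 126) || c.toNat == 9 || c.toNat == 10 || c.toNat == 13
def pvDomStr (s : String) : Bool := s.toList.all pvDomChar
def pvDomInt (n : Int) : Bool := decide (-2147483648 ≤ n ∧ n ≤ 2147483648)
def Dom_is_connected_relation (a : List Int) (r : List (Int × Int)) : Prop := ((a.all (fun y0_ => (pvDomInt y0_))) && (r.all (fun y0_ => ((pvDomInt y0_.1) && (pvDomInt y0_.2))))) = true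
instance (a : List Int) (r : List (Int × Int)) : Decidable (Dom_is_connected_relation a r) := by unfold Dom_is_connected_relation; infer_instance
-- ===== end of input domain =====

-- B keeps A's is_relation guard but replaces A's all-ordered-pairs membership scan over a×a by one
-- pass over r that collects the distinct unordered pairs present and compares their count with n*(n-1)//2.

-- ===== PORT A =====
def is_relation (a b : List Int) (r : List (Int × Int)) : Bool :=
  r.all (fun p => a.contains p.1 && b.contains p.2)

def is_connected_relation (a : List Int) (r : List (Int × Int)) : Bool :=
  is_relation a a r &&
    a.all (fun x => a.all (fun y =>
      if x = y then true else (r.contains (x, y) || r.contains (y, x))))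

-- ===== PORT B =====
-- '(x, y) if x <= y else (y, x)' from Source B
def normPair (p : Int × Int) : Int × Int := if p.1 ≤ p.2 then p else (p.2, p.1)

def is_connected_relation_alt (a : List Int) (r : List (Int × Int)) : Bool :=
  if !is_relation a a r then false
  else
    let covered : PySem.Set (Int × Int) :=
      PySem.Set.ofList ((r.filter (fun p => p.1 != p.2)).map normPair)
    decide (PySem.Set.len covered =
      PySem.Int.floordiv ((a.length : Int) * ((a.length : Int) - 1)) 2)

-- ===== PRECONDITION & SPEC =====
-- Pre_ excludes lists a with duplicate elements: a encodes a Python set (distinct elements by the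
-- type convention), and on a duplicated encoding B's length-based count would not describe any set.
def Pre_is_connected_relation (a : List Int) (r : List (Int × Int)) : Prop := a.Nodup
instance (a : List Int) (r : List (Int × Int)) : Decidable (Pre_is_connected_relation a r) := by unfold Pre_is_connected_relation; infer_instance

def pvWitness_is_connected_relation : List Int × (List (Int × Int)) := ([0, 1], [(0, 1)])

def Spec_is_connected_relation (a : List Int) (r : List (Int × Int)) (out : Bool) : Prop := out = is_connected_relation_alt a r
instance (a : List Int) (r : List (Int × Int)) (out : Bool) : Decidable (Spec_is_connected_relation a r out) := by unfold Spec_is_connected_relation; infer_instance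

-- ===== CLAIM (what is proved, stated in full; the proofs are below) =====
def Claim_equal_is_connected_relation : Prop := ∀ (a : List Int) (r : List (Int × Int)), Dom_is_connected_relation a r → Pre_is_connected_relation a r → Spec_is_connected_relation a r (is_connected_relation a r)

-- ===== LEMMAS AND PROOFS =====

-- the list of all normalized unordered pairs of distinct positions of a
def allP : List Int → List (Int × Int)
  | [] => []
  | x :: xs => (xs.map (fun y => normPair (x, y))) ++ allP xs

theorem normPair_swap (x y : Int) : normPair (y, x) = normPair (x, y) := by
  simp only [normPair]
  split_ifs with h1 h2 _
  · obtain rfl : x = y := le_antisymm h2 h1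
    rfl
  · rfl
  · rfl
  · omega

theorem normPair_cases (x y : Int) : normPair (x, y) = (x, y) ∨ normPair (x, y) = (y, x) := by
  simp only [normPair]
  split_ifs <;> simp

theorem normPair_eq_norm {p : Int × Int} {x y : Int} (hne : p.1 ≠ p.2)
    (h : normPair p = normPair (x, y)) : p = (x, y) ∨ p = (y, x) := by
  obtain ⟨u, v⟩ := p
  simp only [normPair] at h hne ⊢
  split_ifs at h <;> simp only [Prod.mk.injEq] at h ⊢ <;> omega

theorem normPair_inj {z y1 y2 : Int} (h1 : z ≠ y1) (h2 : z ≠ y2)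
    (h : normPair (z, y1) = normPair (z, y2)) : y1 = y2 := by
  simp only [normPair] at h
  split_ifs at h <;> simp only [Prod.mk.injEq] at h <;> omega

theorem allP_coords {a : List Int} {p : Int × Int} (h : p ∈ allP a) : p.1 ∈ a ∧ p.2 ∈ a := by
  induction a with
  | nil => simp [allP] at h
  | cons z zs ih =>
    simp only [allP, List.mem_append, List.mem_map] at h
    rcases h with ⟨y, hy, rfl⟩ | h
    · rcases normPair_cases z y with h' | h' <;> rw [h'] <;>
        exact ⟨by simp [hy], by simp [hy]⟩
    · rcases ih h with ⟨h1, h2⟩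
      exact ⟨List.mem_cons_of_mem _ h1, List.mem_cons_of_mem _ h2⟩

theorem allP_sound {a : List Int} (hnd : a.Nodup) {p : Int × Int} (h : p ∈ allP a) :
    ∃ x ∈ a, ∃ y ∈ a, x ≠ y ∧ p = normPair (x, y) := by
  induction a with
  | nil => simp [allP] at h
  | cons z zs ih =>
    simp only [allP, List.mem_append, List.mem_map] at h
    rcases h with ⟨y, hy, rfl⟩ | h
    · exact ⟨z, by simp, y, by simp [hy], fun he => (List.nodup_cons.mp hnd).1 (he ▸ hy), rfl⟩
    · obtain ⟨x, hx, y, hy, hxy, rfl⟩ := ih (List.nodup_cons.mp hnd).2 h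
      exact ⟨x, by simp [hx], y, by simp [hy], hxy, rfl⟩

theorem allP_complete {a : List Int} (hnd : a.Nodup) {x y : Int}
    (hx : x ∈ a) (hy : y ∈ a) (hxy : x ≠ y) : normPair (x, y) ∈ allP a := by
  induction a with
  | nil => simp at hx
  | cons z zs ih =>
    obtain ⟨hz, hzs⟩ := List.nodup_cons.mp hnd
    simp only [allP, List.mem_append, List.mem_map]
    rcases List.mem_cons.mp hx with rfl | hx'
    · rcases List.mem_cons.mp hy with rfl | hy'
      · exact absurd rfl hxy
      · exact Or.inl ⟨y, hy', rfl⟩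
    · rcases List.mem_cons.mp hy with rfl | hy'
      · exact Or.inl ⟨x, hx', (normPair_swap y x).symm⟩
      · exact Or.inr (ih hzs hx' hy')

theorem allP_nodup {a : List Int} (hnd : a.Nodup) : (allP a).Nodup := by
  induction a with
  | nil => simp [allP]
  | cons z zs ih =>
    obtain ⟨hz, hzs⟩ := List.nodup_cons.mp hnd
    refine List.Nodup.append ?_ (ih hzs) ?_
    · refine List.Nodup.map_on ?_ hzs
      intro y1 h1 y2 h2 he
      exact normPair_inj (fun e => hz (by rw [e]; exact h1))
        (fun e => hz (by rw [e]; exact h2)) he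
    · intro p hp hq
      obtain ⟨y, hy, rfl⟩ := List.mem_map.mp hp
      have hc := allP_coords hq
      rcases normPair_cases z y with h' | h' <;> rw [h'] at hc
      · exact hz hc.1
      · exact hz hc.2

theorem allP_len (a : List Int) : 2 * (allP a).length + a.length = a.length * a.length := by
  induction a with
  | nil => simp [allP]
  | cons z zs ih =>
    simp only [allP, List.length_append, List.length_map, List.length_cons]
    have h2 : (zs.length + 1) * (zs.length + 1) = zs.length * zs.length + 2 * zs.length + 1 := by
      ring
    rw [h2]
    omega

-- membership in B's covered set
theorem mem_covered {r : List (Int × Int)} {q : Int × Int} :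
    q ∈ PySem.Set.ofList ((r.filter (fun p => p.1 != p.2)).map normPair) ↔
      ∃ p ∈ r, p.1 ≠ p.2 ∧ q = normPair p := by
  rw [PySem.Set.mem_ofList]
  simp only [List.mem_map, List.mem_filter, bne_iff_ne]
  constructor
  · rintro ⟨p, ⟨hp, hne⟩, rfl⟩; exact ⟨p, hp, hne, rfl⟩
  · rintro ⟨p, hp, hne, rfl⟩; exact ⟨p, ⟨hp, hne⟩, rfl⟩

theorem is_relation_iff {a : List Int} {r : List (Int × Int)} :
    is_relation a a r = true ↔ ∀ p ∈ r, p.1 ∈ a ∧ p.2 ∈ a := by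
  simp [is_relation, List.all_eq_true]

-- ===== VERDICT (by name: the statement is the Claim_ definition above) =====
theorem is_connected_relation_spec : Claim_equal_is_connected_relation := by
  intro a r _ hnd
  show is_connected_relation a r = is_connected_relation_alt a r
  unfold is_connected_relation is_connected_relation_alt
  cases hrel : is_relation a a r with
  | false => simp
  | true =>
    simp only [Bool.not_true, Bool.false_eq_true, if_false, Bool.true_and]
    have hrmem : ∀ p ∈ r, p.1 ∈ a ∧ p.2 ∈ a := is_relation_iff.mp hrel
    set C : List (Int × Int) :=
      PySem.Set.ofList ((r.filter (fun p => p.1 != p.2)).map normPair) with hC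
    have hCnd : C.Nodup := PySem.Set.nodup_ofList _
    have hPnd : (allP a).Nodup := allP_nodup hnd
    have hCsub : C.toFinset ⊆ (allP a).toFinset := by
      intro q hq
      rw [List.mem_toFinset] at hq ⊢
      obtain ⟨p, hp, hne, rfl⟩ := mem_covered.mp hq
      obtain ⟨h1, h2⟩ := hrmem p hp
      have := allP_complete hnd h1 h2 hne
      simpa using this
    -- the target count as an Int
    have hfl : PySem.Int.floordiv ((a.length : Int) * ((a.length : Int) - 1)) 2 =
        ((allP a).length : Int) := by
      have h := allP_len a
      have h' : (a.length : Int) * ((a.length : Int) - 1) = 2 * ((allP a).length : Int) := by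
        have hc : (2 * ((allP a).length : Int) + (a.length : Int)) =
            (a.length : Int) * (a.length : Int) := by exact_mod_cast h
        linarith [hc]
      rw [h', PySem.Int.floordiv_eq_ediv_of_pos (by norm_num)]
      exact Int.mul_ediv_cancel_left _ (by norm_num)
    by_cases hall : ∀ x ∈ a, ∀ y ∈ a, x ≠ y → ((x, y) ∈ r ∨ (y, x) ∈ r)
    · -- both sides true
      have lhs : (a.all (fun x => a.all (fun y =>
          if x = y then true else (r.contains (x, y) || r.contains (y, x))))) = true := by
        simp only [List.all_eq_true]
        intro x hx y hy
        split_ifs with he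
        · rfl
        · simpa using hall x hx y hy he
      rw [lhs]
      have hPsub : (allP a).toFinset ⊆ C.toFinset := by
        intro q hq
        rw [List.mem_toFinset] at hq ⊢
        obtain ⟨x, hx, y, hy, hxy, rfl⟩ := allP_sound hnd hq
        rcases hall x hx y hy hxy with h | h
        · exact mem_covered.mpr ⟨(x, y), h, hxy, rfl⟩
        · exact mem_covered.mpr ⟨(y, x), h, fun e => hxy e.symm, (normPair_swap x y).symm⟩
      have hcard : C.length = (allP a).length := by
        rw [← List.toFinset_card_of_nodup hCnd, ← List.toFinset_card_of_nodup hPnd]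
        exact congrArg Finset.card (Finset.Subset.antisymm hCsub hPsub)
      symm
      rw [decide_eq_true_eq, hfl]
      simp only [PySem.Set.len, hcard]
    · -- both sides false
      have lhs : (a.all (fun x => a.all (fun y =>
          if x = y then true else (r.contains (x, y) || r.contains (y, x))))) = false := by
        rw [← Bool.not_eq_true]
        simp only [List.all_eq_true]
        intro hcon
        apply hall
        intro x hx y hy hxy
        have := hcon x hx y hy
        rw [if_neg hxy] at this
        simpa using this
      rw [lhs]
      symm
      rw [decide_eq_false_iff_not, hfl]
      intro heq
      have hlen : C.length = (allP a).length := by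
        have : (C.length : Int) = ((allP a).length : Int) := by
          simpa [PySem.Set.len, ← hC] using heq
        exact_mod_cast this
      have hcard : (allP a).toFinset.card ≤ C.toFinset.card := by
        rw [List.toFinset_card_of_nodup hCnd, List.toFinset_card_of_nodup hPnd, hlen]
      have hPsub : (allP a).toFinset ⊆ C.toFinset := by
        rw [Finset.eq_of_subset_of_card_le hCsub hcard]
      apply hall
      intro x hx y hy hxy
      have hmem : normPair (x, y) ∈ C := by
        have := hPsub (List.mem_toFinset.mpr (allP_complete hnd hx hy hxy))
        simpa using this
      obtain ⟨p, hp, hne, he⟩ := mem_covered.mp hmem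
      rcases normPair_eq_norm hne he.symm with rfl | rfl
      · exact Or.inl hp
      · exact Or.inr hp
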